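-- pv_equiv track=rewrite | github.com/camellia2077/FlipBits | tools/scripts/android/translate/core/android_string_text.py | _unescape_android_string
-- ===== SOURCE A (Python) =====
-- def _unescape_android_string(value: str) -> str:
--     if "\\" not in value:
--         return value
--
--     result: list[str] = []
--     index = 0
--     while index < len(value):
--         char = value[index]
--         if char != "\\" or index == len(value) - 1:
--             result.append(char)
--             index += 1
--             continue
--
--         next_char = value[index + 1]
--         if next_char in ("\\", "'", '"', "@", "?"):
--             result.append(next_char)
--             index += 2
--             continue
--
--         if next_char == "n":
--             result.append("\n")
--             index += 2
--             continue
--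
--         if next_char == "t":
--             result.append("\t")
--             index += 2
--             continue
--
--         # Preserve unsupported escapes literally so review/matching logic does
--         # not silently drop the backslash and hide malformed resource text.
--         result.append("\\")
--         result.append(next_char)
--         index += 2
--
--     return "".join(result)
-- ===== SOURCE B (Python) =====
-- import re
--
-- _SIMPLE = {'\\', "'", '"', '@', '?'}
--
-- def _repl(m: "re.Match[str]") -> str:
--     c = m.group(1)
--     if c in _SIMPLE:
--         return c
--     if c == 'n':
--         return '\n'
--     if c == 't':
--         return '\t'
--     return '\\' + c
--
-- def _unescape_android_string(value: str) -> str: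
--     # no re.DOTALL: a backslash before a real newline is left alone, and a
--     # trailing lone backslash never matches, matching the hand-written scanner.
--     return re.sub(r'\\(.)', _repl, value)
-- ===== Notes on version B (the rewrite author's own statement) =====
-- stated objective: idiomatic
-- what changed: Replaces the hand-written index-based while loop that dispatches on value[index]/value[index+1] with a single re.sub(r'\\(.)', repl, value) pass whose replacement function maps the captured character (no DOTALL, so a backslash before a real newline or at the end of the string stays literal, exactly as A leaves it).
import Mathlib
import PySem

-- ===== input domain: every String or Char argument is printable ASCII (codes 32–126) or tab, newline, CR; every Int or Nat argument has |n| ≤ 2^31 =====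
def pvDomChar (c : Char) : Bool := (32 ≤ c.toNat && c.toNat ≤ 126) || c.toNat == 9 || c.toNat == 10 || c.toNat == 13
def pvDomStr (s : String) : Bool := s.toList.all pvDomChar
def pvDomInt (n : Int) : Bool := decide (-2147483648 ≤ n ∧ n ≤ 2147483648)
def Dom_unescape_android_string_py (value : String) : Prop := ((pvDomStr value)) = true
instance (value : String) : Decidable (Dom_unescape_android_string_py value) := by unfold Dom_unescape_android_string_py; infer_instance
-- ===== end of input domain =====

-- B replaces A's index-based while loop with one regex substitution re.sub(r'\\(.)', repl, value) (idiomatic; same output).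

-- ===== PORT A =====
-- A's while loop over `index`, appending to `result`; recursion on the remaining length.
def pvGoA (s : List Char) (index : Nat) (result : List Char) : List Char :=
  if index < s.length then
    let char := s.getD index ' '          -- value[index], always in range here
    if char ≠ '\\' ∨ index = s.length - 1 then
      pvGoA s (index + 1) (result ++ [char])
    else
      let nc := s.getD (index + 1) ' '    -- value[index+1], in range since index ≠ len-1
      if nc = '\\' ∨ nc = '\'' ∨ nc = '"' ∨ nc = '@' ∨ nc = '?' then
        pvGoA s (index + 2) (result ++ [nc])
      else if nc = 'n' then
        pvGoA s (index + 2) (result ++ ['\n'])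
      else if nc = 't' then
        pvGoA s (index + 2) (result ++ ['\t'])
      else
        pvGoA s (index + 2) (result ++ ['\\', nc])
  else result
termination_by s.length - index
decreasing_by all_goals omega

def unescape_android_string_py (value : String) : String :=
  if ¬ value.toList.contains '\\' then value
  else String.ofList (pvGoA value.toList 0 [])

-- ===== PORT B =====
-- re.sub(r'\\(.)', _repl, value): _repl of the captured character.
def pvRepl (c : Char) : List Char :=
  if c = '\\' ∨ c = '\'' ∨ c = '"' ∨ c = '@' ∨ c = '?' then [c]
  else if c = 'n' then ['\n']
  else if c = 't' then ['\t']
  else ['\\', c]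

-- the re.sub scan: at each position try to match '\\(.)' ('.' never matches '\n',
-- no DOTALL); on a match emit pvRepl of the captured char and skip both characters,
-- otherwise copy one character and advance.
def pvGoB : List Char → List Char
  | [] => []
  | [c] => [c]
  | c :: d :: rest =>
      if c = '\\' ∧ d ≠ '\n' then pvRepl d ++ pvGoB rest
      else c :: pvGoB (d :: rest)

def unescape_android_string_py_alt (value : String) : String :=
  String.ofList (pvGoB value.toList)

-- ===== PRECONDITION & SPEC =====
def Spec_unescape_android_string_py (value : String) (out : String) : Prop := out = unescape_android_string_py_alt value
instance (value : String) (out : String) : Decidable (Spec_unescape_android_string_py value out) := by unfold Spec_unescape_android_string_py; infer_instance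

-- ===== CLAIM (what is proved, stated in full; the proofs are below) =====
def Claim_equal_unescape_android_string_py : Prop := ∀ (value : String), Dom_unescape_android_string_py value → Spec_unescape_android_string_py value (unescape_android_string_py value)

-- ===== LEMMAS AND PROOFS =====

-- B is the identity on backslash-free input (A's early return).
theorem pvGoB_no_backslash (s : List Char) (h : ¬ s.contains '\\') : pvGoB s = s := by
  induction s using pvGoB.induct with
  | case1 => rfl
  | case2 c => rfl
  | case3 c d rest hm ih =>
      exfalso; apply h; simp [hm.1]
  | case4 c d rest hm ih =>
      have hr : ¬ (d :: rest).contains '\\' := by simp at h ⊢; exact h.2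
      simp only [pvGoB, if_neg hm]
      rw [ih hr]

-- an unmatched position copies one character
theorem pvGoB_cons_ne (c : Char) (rest : List Char) (hc : c ≠ '\\') :
    pvGoB (c :: rest) = c :: pvGoB rest := by
  cases rest with
  | nil => rfl
  | cons d tl => simp [pvGoB, hc]

-- a backslash followed by anything contributes pvRepl of the next character
theorem pvGoB_backslash_cons (nc : Char) (tl : List Char) :
    pvGoB ('\\' :: nc :: tl) = pvRepl nc ++ pvGoB tl := by
  by_cases hn : nc = '\n'
  · subst hn
    rw [show pvGoB ('\\' :: '\n' :: tl) = '\\' :: pvGoB ('\n' :: tl) by simp [pvGoB]]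
    rw [pvGoB_cons_ne '\n' tl (by decide)]
    simp [pvRepl]
  · simp [pvGoB, hn]

-- main invariant: A's loop from position `index` equals `result` followed by B on the tail
theorem pvGoA_eq (s : List Char) (index : Nat) (result : List Char) :
    pvGoA s index result = result ++ pvGoB (s.drop index) := by
  by_cases h : index < s.length
  · have hget : s.drop index = s[index] :: s.drop (index + 1) := by
      simpa using (List.drop_eq_getElem_cons h)
    have hd : s.getD index ' ' = s[index] := List.getD_eq_getElem s ' ' h
    rw [pvGoA]
    simp only [h, if_pos]
    by_cases hc : s.getD index ' ' ≠ '\\' ∨ index = s.length - 1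
    · rw [if_pos hc]
      rw [pvGoA_eq s (index + 1) (result ++ [s.getD index ' '])]
      rw [hget, hd]
      by_cases hb : s[index] = '\\'
      · -- then index = len - 1, so the tail after is empty: both sides are result ++ [char]
        have hne : index = s.length - 1 := by
          rcases hc with hc | hc
          · exact absurd (hd.trans hb) hc
          · exact hc
        have hdrop : s.drop (index + 1) = [] := List.drop_eq_nil_of_le (by omega)
        rw [hdrop]; simp [pvGoB]
      · rw [pvGoB_cons_ne _ _ hb]; simp
    · rw [if_neg hc]
      simp only [not_or, not_not] at hc
      obtain ⟨hbs, hne⟩ := hc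
      have hbs' : s[index] = '\\' := by rw [← hd]; simpa using hbs
      have h2 : index + 1 < s.length := by omega
      have hget2 : s.drop (index + 1) = s[index + 1] :: s.drop (index + 2) := by
        simpa using (List.drop_eq_getElem_cons h2)
      have hd2 : s.getD (index + 1) ' ' = s[index + 1] := List.getD_eq_getElem s ' ' h2
      have hB : pvGoB (s.drop index) = pvRepl (s[index + 1]) ++ pvGoB (s.drop (index + 2)) := by
        rw [hget, hget2, hbs', pvGoB_backslash_cons]
      rw [hB, hd2]
      set nc := s[index + 1] with hnc
      by_cases h1 : nc = '\\' ∨ nc = '\'' ∨ nc = '"' ∨ nc = '@' ∨ nc = '?'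
      · rw [if_pos h1, pvGoA_eq s (index + 2) (result ++ [nc])]
        simp [pvRepl, h1]
      · rw [if_neg h1]
        by_cases h2n : nc = 'n'
        · rw [if_pos h2n, pvGoA_eq s (index + 2) (result ++ ['\n'])]
          simp [pvRepl, h2n]
        · rw [if_neg h2n]
          by_cases h2t : nc = 't'
          · rw [if_pos h2t, pvGoA_eq s (index + 2) (result ++ ['\t'])]
            simp [pvRepl, h2t]
          · rw [if_neg h2t, pvGoA_eq s (index + 2) (result ++ ['\\', nc])]
            simp [pvRepl, h1, h2n, h2t]
  · rw [pvGoA]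
    simp only [h, if_false]
    have hdrop : s.drop index = [] := List.drop_eq_nil_of_le (by omega)
    simp [hdrop, pvGoB]
termination_by s.length - index
decreasing_by all_goals omega

-- ===== VERDICT (by name: the statement is the Claim_ definition above) =====
theorem unescape_android_string_py_spec : Claim_equal_unescape_android_string_py := by
  intro value _
  unfold Spec_unescape_android_string_py unescape_android_string_py unescape_android_string_py_alt
  by_cases h : value.toList.contains '\\'
  · rw [if_neg (by simpa using h)]
    rw [pvGoA_eq]
    simp
  · rw [if_pos (by simpa using h)]
    rw [pvGoB_no_backslash _ h]
    simp
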